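-- pv_equiv track=rewrite | github.com/asirvex/andela-interview | pig_latin_converter.py | add_suffix
-- ===== SOURCE A (Python) =====
-- vowels = ["a","e", "i", "o", "u", "A", "E", "I", "O", "U"]
--
-- def vowel_position(word):
--     pos = 0
--     for letter in word:
--         if letter in vowels:
--             return pos
--         pos += 1
--     else:
--         return "no_vowel"
--
-- def add_suffix(word):
--     ls_word = list(word)
--     vp = vowel_position(word)
--     if vp == 0:
--         ls_word.append("way")
--         return "".join(ls_word)
--     elif vp == "no_vowel":
--         ls_word.append("ay")
--         return "".join(ls_word)
--     else:
--         suf = ls_word[0:vp]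
--         ls_word = ls_word[vp:]
--         for i in suf:
--             ls_word.append(i)
--         ls_word.append("ay")
--         return "".join(ls_word)
-- ===== SOURCE B (Python) =====
-- VOWELS = set("aeiouAEIOU")
--
-- def add_suffix(word):
--     if word and word[0] in VOWELS:
--         return word + "way"
--     # Rotate the first letter to the end until a vowel leads or every
--     # letter has been rotated once (no vowel, including the empty word).
--     w = word
--     fuel = len(word)
--     while fuel > 0 and w[0] not in VOWELS:
--         w = w[1:] + w[0]
--         fuel -= 1
--     return w + "ay"
-- ===== Notes on version B (the rewrite author's own statement) =====
-- stated objective: alternative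
-- what changed: Replaces A's find-first-vowel-index helper (with its 'no_vowel' sentinel), list(word) conversion and slice-plus-append reassembly with a rotation loop: the word is rotated one letter at a time until a vowel leads or a full cycle completes, so no vowel position is ever computed or sliced on.
import Mathlib
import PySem

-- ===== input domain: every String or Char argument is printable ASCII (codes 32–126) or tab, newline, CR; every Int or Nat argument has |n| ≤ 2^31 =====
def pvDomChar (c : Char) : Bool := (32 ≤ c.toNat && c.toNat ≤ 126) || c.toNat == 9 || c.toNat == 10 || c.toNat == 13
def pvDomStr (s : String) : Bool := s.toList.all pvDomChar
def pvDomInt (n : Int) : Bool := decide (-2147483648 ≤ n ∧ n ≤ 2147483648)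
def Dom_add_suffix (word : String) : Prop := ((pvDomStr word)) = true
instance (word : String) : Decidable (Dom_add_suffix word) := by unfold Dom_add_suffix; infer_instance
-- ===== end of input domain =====

-- B replaces A's find-first-vowel-index-then-slice assembly by a recursive one-letter-at-a-time
-- rotation until a vowel leads (objective: alternative); same return value for every string.

-- ===== PORT A =====
def pyVowels : List Char := ['a','e','i','o','u','A','E','I','O','U']

-- vowel_position returns an int position or the string sentinel "no_vowel";
-- ported as Option Int with none standing for "no_vowel".
def vowel_position_loop : List Char → Int → Option Int
  | [], _ => none
  | c :: rest, pos =>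
      if pyVowels.contains c then some pos else vowel_position_loop rest (pos + 1)

def vowel_position (word : String) : Option Int :=
  vowel_position_loop word.toList 0

-- "".join of one-character strings plus the final suffix = String.mk of the char list (exact).
def add_suffix (word : String) : String :=
  let ls_word := word.toList
  let vp := vowel_position word
  if vp = some 0 then
    String.mk (ls_word ++ "way".toList)
  else if vp = none then
    String.mk (ls_word ++ "ay".toList)
  else
    -- in this branch vp = some v with v ≠ 0; Python just uses the bound vp
    let v := vp.getD 0
    let suf := PySem.List.slice ls_word (some 0) (some v)
    let ls_word := PySem.List.slice ls_word (some v) none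
    let ls_word := suf.foldl (fun acc i => acc ++ [i]) ls_word
    String.mk (ls_word ++ "ay".toList)

-- ===== PORT B =====
def bVowels : List Char := "aeiouAEIOU".toList

-- The while loop 'while fuel > 0 and w[0] not in VOWELS: w = w[1:] + w[0]; fuel -= 1'
-- ported as recursion on fuel; w[1:] + w[0] is the one-step rotation rest ++ [c].
-- The [] branch with fuel > 0 is unreachable (fuel starts at the length, which
-- rotation preserves, so w is nonempty whenever fuel > 0).
def rotB (w : List Char) : Nat → List Char
  | 0 => w ++ "ay".toList
  | fuel + 1 =>
      match w with
      | [] => []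
      | c :: rest =>
          if bVowels.contains c then w ++ "ay".toList
          else rotB (rest ++ [c]) fuel

-- 'word and word[0] in VOWELS' = the char list is nonempty with a leading vowel.
def add_suffix_alt (word : String) : String :=
  let cs := word.toList
  if (match cs with | [] => false | c :: _ => bVowels.contains c) then
    String.mk (cs ++ "way".toList)
  else
    String.mk (rotB cs cs.length)

-- ===== PRECONDITION & SPEC =====
def Spec_add_suffix (word : String) (out : String) : Prop := out = add_suffix_alt word
instance (word : String) (out : String) : Decidable (Spec_add_suffix word out) := by unfold Spec_add_suffix; infer_instance

-- ===== CLAIM (what is proved, stated in full; the proofs are below) =====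
def Claim_equal_add_suffix : Prop := ∀ (word : String), Dom_add_suffix word → Spec_add_suffix word (add_suffix word)

-- ===== LEMMAS AND PROOFS =====
theorem bVowels_eq : bVowels = pyVowels := by decide

theorem loop_eq (cs : List Char) (p : Nat) :
    vowel_position_loop cs (p : Int) =
      (if cs.findIdx (fun c => decide (c ∈ pyVowels)) = cs.length then none
       else some ((p + cs.findIdx (fun c => decide (c ∈ pyVowels)) : Nat) : Int)) := by
  induction cs generalizing p with
  | nil => simp [vowel_position_loop]
  | cons c rest ih =>
      rw [vowel_position_loop]
      by_cases hc : c ∈ pyVowels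
      · simp [List.findIdx_cons, hc]
      · rw [if_neg (by simpa using hc)]
        have h1 : ((p : Int) + 1) = ((p + 1 : Nat) : Int) := by push_cast; ring
        rw [h1, ih]
        simp only [List.findIdx_cons, hc, decide_false, cond_false, List.length_cons]
        split_ifs with h h' h'
        · rfl
        · omega
        · omega
        · congr 1; omega

theorem loop_eq0 (cs : List Char) :
    vowel_position_loop cs 0 =
      (if cs.findIdx (fun c => decide (c ∈ pyVowels)) = cs.length then none
       else some ((cs.findIdx (fun c => decide (c ∈ pyVowels)) : Nat) : Int)) := by
  simpa using loop_eq cs 0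

-- Characterisation of the rotation: with enough fuel it brings the first vowel (at
-- findIdx position k) to the front, i.e. returns drop k ++ take k ++ "ay"; with no
-- vowel within the fuel it performs exactly `fuel` rotations.
theorem rotB_eq (fuel : Nat) (w : List Char) (hf : fuel ≤ w.length) :
    rotB w fuel =
      (if w.findIdx (fun c => decide (c ∈ pyVowels)) < fuel then
        w.drop (w.findIdx (fun c => decide (c ∈ pyVowels))) ++
          w.take (w.findIdx (fun c => decide (c ∈ pyVowels))) ++ "ay".toList
       else w.rotate fuel ++ "ay".toList) := by
  induction fuel generalizing w with
  | zero => simp [rotB]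
  | succ fuel ih =>
      match w with
      | [] => simp at hf
      | c :: rest =>
          rw [rotB]
          by_cases hc : c ∈ pyVowels
          · rw [if_pos (by simp [bVowels_eq, hc])]
            simp [List.findIdx_cons, hc]
          · rw [if_neg (by simp [bVowels_eq, hc])]
            have hf' : fuel ≤ (rest ++ [c]).length := by
              simp at hf ⊢; omega
            rw [ih _ hf']
            simp only [List.findIdx_cons, hc, decide_false, cond_false]
            rw [List.findIdx_append]
            by_cases hrest : rest.findIdx (fun c => decide (c ∈ pyVowels)) < rest.length
            · rw [if_pos hrest]
              by_cases hlt : rest.findIdx (fun c => decide (c ∈ pyVowels)) < fuel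
              · rw [if_pos hlt, if_pos (by omega)]
                rw [List.drop_append_of_le_length (le_of_lt hrest),
                  List.take_append_of_le_length (le_of_lt hrest)]
                simp
              · rw [if_neg hlt, if_neg (by omega), List.rotate_cons_succ]
            · rw [if_neg hrest]
              have hr : rest.findIdx (fun c => decide (c ∈ pyVowels)) = rest.length :=
                Nat.le_antisymm List.findIdx_le_length (Nat.not_lt.mp hrest)
              have h1 : [c].findIdx (fun c => decide (c ∈ pyVowels)) = 1 := by
                simp [List.findIdx_cons, hc]
              rw [h1, hr]
              have hfle : fuel ≤ rest.length := by simp at hf; omega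
              rw [if_neg (by omega), if_neg (by omega), List.rotate_cons_succ]

theorem flatten_map_single {α : Type} (l : List α) :
    (List.map (fun x => [x]) l).flatten = l := by
  induction l with
  | nil => rfl
  | cons x xs ih => simp [ih]

-- ===== VERDICT (by name: the statement is the Claim_ definition above) =====
theorem add_suffix_spec : Claim_equal_add_suffix := by
  intro word _
  unfold Spec_add_suffix
  simp only [add_suffix, add_suffix_alt, vowel_position]
  generalize word.toList = cs
  rw [loop_eq0, rotB_eq cs.length cs le_rfl]
  by_cases hlen : cs.findIdx (fun c => decide (c ∈ pyVowels)) = cs.length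
  · match cs with
    | [] => simp
    | c :: rest =>
        have hc : c ∉ pyVowels := fun h => by simp [List.findIdx_cons, h] at hlen
        simp [hlen, bVowels_eq, hc]
  · by_cases hk0 : cs.findIdx (fun c => decide (c ∈ pyVowels)) = 0
    · match cs with
      | [] => simp at hlen
      | c :: rest =>
          have hc : c ∈ pyVowels := by
            by_contra h
            simp [List.findIdx_cons, h] at hk0
          simp [hk0, bVowels_eq, hc]
    · match cs with
      | [] => simp at hlen
      | c :: rest =>
          have hc : c ∉ pyVowels := fun h => hk0 (by simp [List.findIdx_cons, h])
          have hklt : (c :: rest).findIdx (fun c => decide (c ∈ pyVowels)) < (c :: rest).length :=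
            lt_of_le_of_ne List.findIdx_le_length hlen
          have hk2 : (c :: rest).findIdx (fun c => decide (c ∈ pyVowels)) ≤ rest.length := by
            simpa [Nat.lt_succ_iff] using hklt
          have hlen' : ¬ (c :: rest).findIdx (fun c => decide (c ∈ pyVowels)) = rest.length + 1 := by
            simpa using hlen
          simp [hlen', hk0, bVowels_eq, hc, hk2,
            PySem.List.slice_from_natCast, PySem.List.slice_to_natCast,
            -List.map_take, flatten_map_single, List.append_assoc]
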